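-- pv_equiv track=rewrite | github.com/elibio67/ANNOgesic | annogesiclib/gen_srna_output.py | merge_info
-- ===== SOURCE A (Python) =====
-- from copy import deepcopy
--
-- def merge_info(blasts):
--     first = True
--     finals = []
--     if len(blasts) != 0:
--         for blast in blasts:
--             if first:
--                 repeat = 0
--                 first = False
--                 pre_blast = deepcopy(blast)
--             else:
--                 if (pre_blast["strain"] == blast["strain"]) and (
--                         pre_blast["strand"] == blast["strand"]) and (
--                         pre_blast["start"] == blast["start"]) and (
--                         pre_blast["end"] == blast["end"]):
--                     if (repeat < 2):
--                         pre_blast["hits"] = ";".join([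
--                             pre_blast["hits"], blast["hits"]])
--                         repeat += 1
--                 else:
--                     repeat = 0
--                     finals.append(pre_blast)
--                     pre_blast = blast.copy()
--         finals.append(pre_blast)
--     return finals
-- ===== SOURCE B (Python) =====
-- def _key(b):
--     return (b.get("strain", ""), b.get("strand", ""),
--             b.get("start", ""), b.get("end", ""))
--
--
-- def merge_info(blasts):
--     finals = []
--     i = 0
--     n = len(blasts)
--     while i < n:
--         key = _key(blasts[i])
--         j = i + 1
--         while j < n and _key(blasts[j]) == key:
--             j += 1
--         merged = dict(blasts[i])
--         if j - i > 1:
--             merged["hits"] = ";".join(b["hits"] for b in blasts[i:min(j, i + 3)])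
--         finals.append(merged)
--         i = j
--     return finals
-- ===== Notes on version B (the rewrite author's own statement) =====
-- stated objective: alternative
-- what changed: Replaces A's stateful single pass (pre_blast carry, repeat counter, in-place ';'-join mutation per element) by an outer loop that locates each maximal run of equal-key records with an inner index scan and emits one merged record per run, joining the first three hits of a run in a single ';'.join (defaulted key lookups keep B total where A's comparisons short-circuit).
import Mathlib
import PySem

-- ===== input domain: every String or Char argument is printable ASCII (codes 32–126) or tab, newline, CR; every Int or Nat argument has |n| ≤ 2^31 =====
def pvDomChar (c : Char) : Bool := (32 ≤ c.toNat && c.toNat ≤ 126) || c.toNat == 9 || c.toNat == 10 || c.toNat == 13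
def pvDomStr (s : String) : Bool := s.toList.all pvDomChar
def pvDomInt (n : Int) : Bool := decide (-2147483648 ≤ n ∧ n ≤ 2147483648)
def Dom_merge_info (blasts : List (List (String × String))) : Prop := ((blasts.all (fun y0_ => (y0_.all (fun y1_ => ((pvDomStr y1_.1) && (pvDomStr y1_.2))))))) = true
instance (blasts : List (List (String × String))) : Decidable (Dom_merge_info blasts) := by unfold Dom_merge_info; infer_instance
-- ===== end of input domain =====

-- B replaces A's stateful single pass (pre_blast carry, repeat counter, per-element in-place
-- ';'-join mutation) by an outer loop that finds each maximal run of equal-key records with an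
-- inner index scan and emits one merged record per run (joining the first three hits at once);
-- records are looked up with defaults, so B also returns (unmerged/merged records) on inputs
-- where A raises KeyError — on every input where A returns, B returns the same value.

-- dict.get(k, "")-style lookup on a record (Python dict → association list)
def dgetD (r : List (String × String)) (k : String) : String := (PySem.Dict.mk r).getD k ""
-- d[k] = v on a record (overwrite keeps position, new key appends) — Python dict assignment
def dins (r : List (String × String)) (k v : String) : List (String × String) :=
  ((PySem.Dict.mk r).insert k v).items

-- ===== PORT A =====
def stepA (st : List (List (String × String)) × Option (List (String × String)) × Nat)
    (blast : List (String × String)) :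
    List (List (String × String)) × Option (List (String × String)) × Nat :=
  match st with
  | (finals, none, _) => (finals, some blast, 0)
  | (finals, some pre, r) =>
    if dgetD pre "strain" == dgetD blast "strain" && dgetD pre "strand" == dgetD blast "strand"
        && dgetD pre "start" == dgetD blast "start" && dgetD pre "end" == dgetD blast "end" then
      if r < 2 then
        (finals, some (dins pre "hits" (PySem.Str.join ";" [dgetD pre "hits", dgetD blast "hits"])), r + 1)
      else
        (finals, some pre, r)
    else
      (finals ++ [pre], some blast, 0)

def merge_info (blasts : List (List (String × String))) : List (List (String × String)) :=
  let st := blasts.foldl stepA ([], none, 0)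
  match st.2.1 with
  | none => st.1
  | some pre => st.1 ++ [pre]

-- ===== PORT B =====
def keyOf (b : List (String × String)) : String × String × String × String :=
  (dgetD b "strain", dgetD b "strand", dgetD b "start", dgetD b "end")

def hitsOf (b : List (String × String)) : String := dgetD b "hits"

def merge_info_alt : List (List (String × String)) → List (List (String × String))
  | [] => []
  | b :: rest =>
    let run := rest.takeWhile (fun c => keyOf c == keyOf b)
    let merged := if run.isEmpty then b
      else dins b "hits" (PySem.Str.join ";" (((b :: run).take 3).map hitsOf))
    merged :: merge_info_alt (rest.dropWhile (fun c => keyOf c == keyOf b))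
termination_by l => l.length
decreasing_by
  simp only [List.length_cons]
  exact Nat.lt_succ_of_le (List.length_dropWhile_le _ _)

-- ===== PRECONDITION & SPEC =====
-- Pre_ states exactly the inputs on which Python A returns (elsewhere it raises KeyError):
-- every adjacent comparison finds the keys it actually reads under A's short-circuit
-- ('strain' always, later coordinates only while the earlier ones are present and equal), and in
-- every maximal run of ≥ 2 equal-key records the members whose 'hits' A joins (the head and the
-- 2nd/3rd members) carry the "hits" key.
def hasK (r : List (String × String)) (k : String) : Bool := (PySem.Dict.mk r).contains k

def eqKeyB (x y : List (String × String)) : Bool :=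
  hasK x "strain" && hasK y "strain" && hasK x "strand" && hasK y "strand" &&
  hasK x "start" && hasK y "start" && hasK x "end" && hasK y "end" &&
  dgetD x "strain" == dgetD y "strain" && dgetD x "strand" == dgetD y "strand" &&
  dgetD x "start" == dgetD y "start" && dgetD x "end" == dgetD y "end"

def cmpOKB (x y : List (String × String)) : Bool :=
  hasK x "strain" && hasK y "strain" &&
    (!(dgetD x "strain" == dgetD y "strain") ||
      (hasK x "strand" && hasK y "strand" &&
        (!(dgetD x "strand" == dgetD y "strand") ||
          (hasK x "start" && hasK y "start" &&
            (!(dgetD x "start" == dgetD y "start") ||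
              (hasK x "end" && hasK y "end"))))))

def EAt (blasts : List (List (String × String))) (i : Nat) : Bool :=
  i + 1 < blasts.length && eqKeyB (blasts.getD i []) (blasts.getD (i + 1) [])

def Pre_merge_info (blasts : List (List (String × String))) : Prop :=
  (∀ i < blasts.length, i + 1 < blasts.length →
      cmpOKB (blasts.getD i []) (blasts.getD (i + 1) []) = true) ∧
  (∀ i < blasts.length, EAt blasts i = true →
      ((i = 0 ∨ EAt blasts (i - 1) = false) → hasK (blasts.getD i []) "hits" = true) ∧
      ((i < 2 ∨ EAt blasts (i - 1) = false ∨ EAt blasts (i - 2) = false) →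
        hasK (blasts.getD (i + 1) []) "hits" = true))
instance (blasts : List (List (String × String))) : Decidable (Pre_merge_info blasts) := by
  unfold Pre_merge_info; infer_instance

def pvWitness_merge_info : (List (List (String × String))) :=
  [[("strain", "s"), ("strand", "+"), ("start", "1"), ("end", "2"), ("hits", "h")],
   [("strain", "s"), ("strand", "+"), ("start", "1"), ("end", "2"), ("hits", "k")]]

def Spec_merge_info (blasts : List (List (String × String))) (out : List (List (String × String))) : Prop := out = merge_info_alt blasts
instance (blasts : List (List (String × String))) (out : List (List (String × String))) : Decidable (Spec_merge_info blasts out) := by unfold Spec_merge_info; infer_instance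

-- ===== CLAIM (what is proved, stated in full; the proofs are below) =====
def Claim_equal_merge_info : Prop := ∀ (blasts : List (List (String × String))), Dom_merge_info blasts → Pre_merge_info blasts → Spec_merge_info blasts (merge_info blasts)

-- ===== LEMMAS AND PROOFS =====

theorem mk_items {κ ν : Type} [BEq κ] (d : PySem.Dict κ ν) : PySem.Dict.mk d.items = d := rfl

theorem dgetD_dins_ne (r : List (String × String)) (k k' v : String) (h : k' ≠ k) :
    dgetD (dins r k v) k' = dgetD r k' := by
  unfold dgetD dins
  rw [mk_items]
  exact PySem.Dict.getD_insert_of_ne (d := PySem.Dict.mk r) (v := v) (d0 := "") h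

theorem dgetD_dins_self (r : List (String × String)) (v : String) :
    dgetD (dins r "hits" v) "hits" = v := by
  unfold dgetD dins
  rw [mk_items]
  exact PySem.Dict.getD_insert_self (PySem.Dict.mk r) "hits" v ""

theorem dins_dins (r : List (String × String)) (v w : String) :
    dins (dins r "hits" v) "hits" w = dins r "hits" w :=
  congrArg PySem.Dict.items (PySem.Dict.insert_insert_self (PySem.Dict.mk r) "hits" v w)

-- ";".join over a cons as the left fold A iterates
theorem chars_join_merge (sep x h : List Char) (t : List (List Char)) :
    PySem.Chars.join sep ((x ++ sep ++ h) :: t) = PySem.Chars.join sep (x :: h :: t) := by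
  cases t with
  | nil =>
    rw [PySem.Chars.join_singleton, PySem.Chars.join_cons_cons, PySem.Chars.join_singleton]
  | cons u t =>
    rw [PySem.Chars.join_cons_cons, PySem.Chars.join_cons_cons, PySem.Chars.join_cons_cons]
    simp [List.append_assoc]

theorem join_eq_foldl (l : List String) (x : String) :
    PySem.Str.join ";" (x :: l) = l.foldl (fun a h => PySem.Str.join ";" [a, h]) x := by
  induction l generalizing x with
  | nil =>
    rw [← String.toList_inj]
    simp [PySem.Str.toList_join, PySem.Chars.join_singleton]
  | cons h t ih =>
    rw [List.foldl_cons, ← ih]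
    rw [← String.toList_inj]
    simp only [PySem.Str.toList_join, List.map_cons, List.map_nil]
    rw [show PySem.Chars.join (";" : String).toList [x.toList, h.toList]
        = x.toList ++ (";" : String).toList ++ h.toList from by
      rw [PySem.Chars.join_cons_cons, PySem.Chars.join_singleton]]
    rw [chars_join_merge]

def finishA (st : List (List (String × String)) × Option (List (String × String)) × Nat) :
    List (List (String × String)) :=
  match st.2.1 with
  | none => st.1
  | some pre => st.1 ++ [pre]

theorem prefixA (t : List (List (String × String))) (fs : List (List (String × String)))
    (pre : List (String × String)) (r : Nat) :
    finishA (t.foldl stepA (fs, some pre, r)) = fs ++ finishA (t.foldl stepA ([], some pre, r)) := by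
  induction t generalizing fs pre r with
  | nil => simp [finishA]
  | cons b t ih =>
    simp only [List.foldl_cons, stepA]
    split_ifs with h1 h2
    · rw [ih]
    · rw [ih]
    · rw [ih (fs ++ [pre]), ih ([] ++ [pre])]
      simp

theorem condRaw (pre0 b : List (String × String)) :
    (dgetD pre0 "strain" == dgetD b "strain"
      && dgetD pre0 "strand" == dgetD b "strand"
      && dgetD pre0 "start" == dgetD b "start"
      && dgetD pre0 "end" == dgetD b "end")
    = (keyOf b == keyOf pre0) := by
  rw [Bool.eq_iff_iff]
  simp only [Bool.and_eq_true, beq_iff_eq, keyOf, Prod.mk.injEq]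
  constructor
  · rintro ⟨⟨⟨h1, h2⟩, h3⟩, h4⟩
    exact ⟨h1.symm, h2.symm, h3.symm, h4.symm⟩
  · rintro ⟨h1, h2, h3, h4⟩
    exact ⟨⟨⟨h1.symm, h2.symm⟩, h3.symm⟩, h4.symm⟩

theorem condA (pre0 b : List (String × String)) (s : String) :
    (dgetD (dins pre0 "hits" s) "strain" == dgetD b "strain"
      && dgetD (dins pre0 "hits" s) "strand" == dgetD b "strand"
      && dgetD (dins pre0 "hits" s) "start" == dgetD b "start"
      && dgetD (dins pre0 "hits" s) "end" == dgetD b "end")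
    = (keyOf b == keyOf pre0) := by
  rw [dgetD_dins_ne _ _ _ _ (by decide), dgetD_dins_ne _ _ _ _ (by decide),
    dgetD_dins_ne _ _ _ _ (by decide), dgetD_dins_ne _ _ _ _ (by decide)]
  exact condRaw pre0 b

theorem alt_cons (b : List (String × String)) (t : List (List (String × String))) :
    merge_info_alt (b :: t) =
      (if t.takeWhile (fun c => keyOf c == keyOf b) = [] then b
       else dins b "hits" (((t.takeWhile (fun c => keyOf c == keyOf b)).take 2).foldl
          (fun a c => PySem.Str.join ";" [a, hitsOf c]) (dgetD b "hits")))
        :: merge_info_alt (t.dropWhile (fun c => keyOf c == keyOf b)) := by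
  rw [merge_info_alt]
  simp only [List.cons.injEq]
  refine ⟨?_, by trivial⟩
  by_cases hr : t.takeWhile (fun c => keyOf c == keyOf b) = []
  · simp [hr]
  · rw [if_neg hr, if_neg (by simpa [List.isEmpty_iff] using hr)]
    rw [show (b :: t.takeWhile (fun c => keyOf c == keyOf b)).take 3
        = b :: (t.takeWhile (fun c => keyOf c == keyOf b)).take 2 from rfl]
    rw [List.map_cons, join_eq_foldl, List.foldl_map]
    rfl

-- the two loop invariants of A's pass, proved together by strong induction on the list length:
-- from a state whose carried record has already absorbed at least one hit (dins form), and from a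
-- freshly (re)started state carrying a raw record
theorem combo : ∀ (n : Nat) (t : List (List (String × String))), t.length < n →
    ((∀ (pre0 : List (String × String)) (s : String) (r : Nat),
        finishA (t.foldl stepA ([], some (dins pre0 "hits" s), r)) =
          dins pre0 "hits" (((t.takeWhile (fun c => keyOf c == keyOf pre0)).take (2 - r)).foldl
              (fun a c => PySem.Str.join ";" [a, hitsOf c]) s)
            :: merge_info_alt (t.dropWhile (fun c => keyOf c == keyOf pre0)))
     ∧ (∀ (pre0 : List (String × String)),
        finishA (t.foldl stepA ([], some pre0, 0)) =
          (if t.takeWhile (fun c => keyOf c == keyOf pre0) = [] then pre0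
           else dins pre0 "hits" (((t.takeWhile (fun c => keyOf c == keyOf pre0)).take 2).foldl
              (fun a c => PySem.Str.join ";" [a, hitsOf c]) (dgetD pre0 "hits")))
            :: merge_info_alt (t.dropWhile (fun c => keyOf c == keyOf pre0)))) := by
  intro n
  induction n with
  | zero => intro t ht; omega
  | succ n ih =>
    intro t ht
    constructor
    · intro pre0 s r
      cases t with
      | nil => simp [finishA, merge_info_alt]
      | cons b t =>
        have ht' : t.length < n := by simpa using Nat.lt_of_succ_lt_succ ht
        simp only [List.foldl_cons, stepA, condA]
        by_cases hk : (keyOf b == keyOf pre0) = true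
        · rw [if_pos hk]
          by_cases hr : r < 2
          · rw [if_pos hr, dgetD_dins_self, dins_dins, (ih t ht').1 pre0 _ (r + 1),
              List.takeWhile_cons_of_pos (p := fun c => keyOf c == keyOf pre0) hk,
              List.dropWhile_cons_of_pos (p := fun c => keyOf c == keyOf pre0) hk]
            have h2 : 2 - r = (2 - (r + 1)) + 1 := by omega
            rw [h2, List.take_succ_cons, List.foldl_cons]
            simp [hitsOf]
          · rw [if_neg hr, (ih t ht').1 pre0 s r,
              List.takeWhile_cons_of_pos (p := fun c => keyOf c == keyOf pre0) hk,
              List.dropWhile_cons_of_pos (p := fun c => keyOf c == keyOf pre0) hk]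
            have h0 : 2 - r = 0 := by omega
            rw [h0]
            simp
        · rw [if_neg hk, prefixA, (ih t ht').2 b]
          rw [List.takeWhile_cons_of_neg (p := fun c => keyOf c == keyOf pre0) hk,
            List.dropWhile_cons_of_neg (p := fun c => keyOf c == keyOf pre0) hk]
          rw [alt_cons]
          simp
    · intro pre0
      cases t with
      | nil => simp [finishA, merge_info_alt]
      | cons b t =>
        have ht' : t.length < n := by simpa using Nat.lt_of_succ_lt_succ ht
        simp only [List.foldl_cons, stepA, condRaw]
        by_cases hk : (keyOf b == keyOf pre0) = true
        · rw [if_pos hk, if_pos (by norm_num : (0 : Nat) < 2), (ih t ht').1 pre0 _ 1,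
            List.takeWhile_cons_of_pos (p := fun c => keyOf c == keyOf pre0) hk,
            List.dropWhile_cons_of_pos (p := fun c => keyOf c == keyOf pre0) hk]
          rw [if_neg (List.cons_ne_nil _ _)]
          rw [show (b :: t.takeWhile (fun c => keyOf c == keyOf pre0)).take 2
              = b :: (t.takeWhile (fun c => keyOf c == keyOf pre0)).take 1 from rfl]
          rw [List.foldl_cons]
          simp [hitsOf]
        · rw [if_neg hk, prefixA, (ih t ht').2 b]
          rw [List.takeWhile_cons_of_neg (p := fun c => keyOf c == keyOf pre0) hk,
            List.dropWhile_cons_of_neg (p := fun c => keyOf c == keyOf pre0) hk]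
          rw [alt_cons]
          simp

-- ===== VERDICT (by name: the statement is the Claim_ definition above) =====
theorem merge_info_spec : Claim_equal_merge_info := by
  unfold Claim_equal_merge_info
  intro blasts _hdom _hpre
  unfold Spec_merge_info
  cases blasts with
  | nil => simp [merge_info, merge_info_alt]
  | cons b t =>
    have hL : merge_info (b :: t) = finishA (t.foldl stepA ([], some b, 0)) := rfl
    rw [hL, (combo (t.length + 1) t (by omega)).2 b, alt_cons]
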